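-- pv_equiv track=rewrite | github.com/stijn-dejongh/spec-kitty | src/specify_cli/state_contract.py | _remove_subsumed
-- ===== SOURCE A (Python) =====
-- def _remove_subsumed(entries: set[str]) -> set[str]:
--     """Remove entries that are subsumed by a parent directory entry."""
--     return {
--         entry
--         for entry in entries
--         if not any(
--             other != entry and other.endswith("/") and entry.startswith(other)
--             for other in entries
--         )
--     }
-- ===== SOURCE B (Python) =====
-- def _remove_subsumed(entries: set[str]) -> set[str]:
--     """Remove entries that are subsumed by a parent directory entry."""
--     dirs = {e for e in entries if e.endswith("/")}
--
--     def subsumed(e: str) -> bool: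
--         # a subsuming entry is exactly a proper prefix of e that ends in "/"
--         return any(e[i - 1] == "/" and e[:i] in dirs for i in range(1, len(e)))
--
--     return {e for e in entries if not subsumed(e)}
-- ===== Notes on version B (the rewrite author's own statement) =====
-- stated objective: faster
-- what changed: Instead of comparing every entry against every other entry (quadratic in the number of entries), B builds the set of directory entries once and, for each entry, looks up only its own prefixes that end in '/'.
import Mathlib
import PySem

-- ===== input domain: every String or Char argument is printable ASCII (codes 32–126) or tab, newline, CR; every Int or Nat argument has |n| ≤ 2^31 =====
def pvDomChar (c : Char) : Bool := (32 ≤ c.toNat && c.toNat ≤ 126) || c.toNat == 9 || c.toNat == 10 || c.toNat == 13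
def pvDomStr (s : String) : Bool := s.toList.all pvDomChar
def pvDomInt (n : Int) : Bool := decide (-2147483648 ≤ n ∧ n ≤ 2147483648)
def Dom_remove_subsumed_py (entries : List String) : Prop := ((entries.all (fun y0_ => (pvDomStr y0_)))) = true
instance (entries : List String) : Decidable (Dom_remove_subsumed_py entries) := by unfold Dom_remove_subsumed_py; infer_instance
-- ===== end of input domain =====

-- B replaces A's all-pairs subsumption scan by a one-time set of "/"-ending entries probed with each entry's own "/"-ending prefixes (objective: faster).


-- ===== PORT A =====
-- A: set comprehension keeping each entry with no distinct "/"-ending entry as prefix.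
def remove_subsumed_py (entries : List String) : List String :=
  (PySem.Set.ofList entries).filter (fun entry =>
    ! (PySem.Set.ofList entries).any (fun other =>
        other != entry && PySem.Str.endswith other "/" && PySem.Str.startswith entry other))

-- ===== PORT B =====
-- B: the set of "/"-ending entries, built once; an entry is subsumed iff one of its
-- proper prefixes ending in "/" is in that set.
def altDirs (entries : List String) : PySem.Set String :=
  PySem.Set.ofList (entries.filter (fun e => PySem.Str.endswith e "/"))

def altSubsumed (dirs : PySem.Set String) (e : String) : Bool :=
  (PySem.List.pyRange 1 (PySem.Str.len e) 1).any (fun i =>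
    PySem.Str.pyGet? e (i - 1) == some '/' &&
      PySem.Set.contains dirs (PySem.Str.slice e none (some i)))

def remove_subsumed_py_alt (entries : List String) : List String :=
  (PySem.Set.ofList entries).filter (fun e => ! altSubsumed (altDirs entries) e)

-- ===== PRECONDITION & SPEC =====
def Spec_remove_subsumed_py (entries : List String) (out : List String) : Prop := out = remove_subsumed_py_alt entries
instance (entries : List String) (out : List String) : Decidable (Spec_remove_subsumed_py entries out) := by unfold Spec_remove_subsumed_py; infer_instance

-- ===== CLAIM (what is proved, stated in full; the proofs are below) =====
def Claim_equal_remove_subsumed_py : Prop := ∀ (entries : List String), Dom_remove_subsumed_py entries → Spec_remove_subsumed_py entries (remove_subsumed_py entries)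

-- ===== LEMMAS AND PROOFS =====

-- For any string e, A's inner scan over the whole entry set finds a subsuming entry
-- exactly when B's prefix probe into the directory set does.
theorem key (entries : List String) (e : String) :
    ((PySem.Set.ofList entries).any (fun other =>
        other != e && PySem.Str.endswith other "/" && PySem.Str.startswith e other))
      = altSubsumed (altDirs entries) e := by
  rw [Bool.eq_iff_iff]
  simp only [altSubsumed, altDirs, List.any_eq_true, PySem.Set.mem_ofList,
    Bool.and_eq_true, bne_iff_ne, ne_eq, PySem.Str.endswith_eq, PySem.Str.startswith_eq,
    PySem.Chars.endswith_iff, PySem.Chars.startswith_iff, PySem.List.mem_pyRange_one,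
    beq_iff_eq, PySem.Set.contains, List.mem_filter, List.elem_iff, PySem.Str.len_eq,
    PySem.Str.pyGet?_eq, PySem.Chars.pyGet?_eq_listPyGet?]
  constructor
  · rintro ⟨o, ho, ⟨hne, hsuf⟩, hpre⟩
    obtain ⟨t, ht⟩ := hsuf
    have hlen1 : 1 ≤ o.toList.length := by rw [← ht]; simp
    have hlt : o.toList.length < e.toList.length := by
      rcases lt_or_eq_of_le hpre.length_le with h | h
      · exact h
      · exact absurd (String.toList_inj.mp (hpre.eq_of_length h)) hne
    have hslice : (PySem.Str.slice e none (some (o.toList.length : Int))).toList = o.toList := by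
      simp only [PySem.Str.toList_slice, PySem.Chars.slice_eq_listSlice,
        PySem.List.slice_to_natCast]
      exact (List.prefix_iff_eq_take.mp hpre).symm
    refine ⟨(o.toList.length : Int), ⟨by exact_mod_cast hlen1, by exact_mod_cast hlt⟩, ?_, ?_⟩
    · have h1 : ((o.toList.length : Int) - 1) = ((o.toList.length - 1 : Nat) : Int) := by omega
      rw [h1, PySem.List.pyGet?_natCast]
      obtain ⟨r, hr⟩ := hpre
      have : e.toList[o.toList.length - 1]? = o.toList[o.toList.length - 1]? := by
        rw [← hr, List.getElem?_append_left (by omega)]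
      rw [this, ← ht]
      have hl : (t ++ "/".toList).length - 1 = t.length := by simp
      rw [hl]
      simp
    · rw [String.toList_inj.mp hslice]
      exact ⟨ho, t, ht⟩
  · rintro ⟨i, ⟨h1, h2⟩, _, hp_mem, hsuf⟩
    set p := PySem.Str.slice e none (some i) with hp
    have hpl : p.toList = PySem.List.slice e.toList none (some i) := by rw [hp]; simp
    have htake : p.toList = e.toList.take i.toNat := by
      rw [hpl]; exact PySem.List.slice_to e.toList (by omega)
    refine ⟨p, hp_mem, ⟨?_, hsuf⟩, ?_⟩
    · intro h
      have hlen : p.toList.length = i.toNat := by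
        rw [htake, List.length_take]; omega
      rw [h] at hlen
      omega
    · rw [htake]; exact List.take_prefix _ _

-- ===== VERDICT (by name: the statement is the Claim_ definition above) =====
theorem remove_subsumed_py_spec : Claim_equal_remove_subsumed_py := by
  intro entries _
  unfold Spec_remove_subsumed_py remove_subsumed_py remove_subsumed_py_alt
  exact (List.filter_congr (fun e _ => by rw [key entries e])).symm
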